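-- pv_equiv track=rewrite | github.com/AntoninaDavidenko/Lab01 | Part 1/task_1_ex_3.py | func
-- ===== SOURCE A (Python) =====
-- def func(string):
--     x = ""
--     number = 0
--     pr_sign = None
--     double_sign = True
--     for item in string:
--
--         if item == "+" or item == "-":
--             if double_sign:
--                 return False, None
--
--             if pr_sign:
--                 if pr_sign == "+":
--                     number += int(x)
--                     x = ""
--                     pr_sign = item
--                     double_sign = True
--                 elif pr_sign == "-":
--                     number -= int(x)
--                     x = ""
--                     pr_sign = item
--                     double_sign = True
--             else:
--                 if item == "+":
--                     number = int(x)
--                     x = ""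
--                     pr_sign = "+"
--                     double_sign = True
--
--                 elif item == "-":
--                     number = int(x)
--                     x = ""
--                     pr_sign = "-"
--                     double_sign = True
--
--         elif item == "0" or item == "1" or item == "2" or item == "3" or item == "4" or item == "5" or item == "6" or item == "7" or item == "8" or item == "9":
--             x += item
--             double_sign = False
--
--         else:
--             return False, None
--     if double_sign:
--         return False, None
--     if pr_sign == None:
--         number = int(x)
--     if pr_sign == "+":
--         number += int(x)
--     if pr_sign == "-":
--         number -= int(x)
--     return True, number
-- ===== SOURCE B (Python) =====
-- def func(string):
--     total = 0
--     digits = ""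
--     for ch in reversed(string):
--         if ch in "0123456789":
--             digits = ch + digits
--         elif ch in "+-":
--             if not digits:
--                 return False, None
--             total += int(digits) if ch == "+" else -int(digits)
--             digits = ""
--         else:
--             return False, None
--     if not digits:
--         return False, None
--     return True, total + int(digits)
-- ===== Notes on version B (the rewrite author's own statement) =====
-- stated objective: simpler
-- what changed: Replaces A's left-to-right state machine (pending-sign memory, double_sign flag, four-branch sign handling) by a single right-to-left scan that collects each digit group and applies its preceding sign immediately, so no sign state survives between groups.
import Mathlib
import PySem

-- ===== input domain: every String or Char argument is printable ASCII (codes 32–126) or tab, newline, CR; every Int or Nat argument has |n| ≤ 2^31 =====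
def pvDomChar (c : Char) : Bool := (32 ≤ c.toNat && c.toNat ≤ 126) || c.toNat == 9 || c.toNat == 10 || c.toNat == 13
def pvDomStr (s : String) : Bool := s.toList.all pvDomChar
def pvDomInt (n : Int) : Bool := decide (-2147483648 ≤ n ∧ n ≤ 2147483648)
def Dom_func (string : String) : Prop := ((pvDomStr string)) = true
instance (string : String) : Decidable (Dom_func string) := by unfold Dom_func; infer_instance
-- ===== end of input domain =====

-- B replaces A's left-to-right sign-memory state machine by a right-to-left scan that
-- applies each digit group's preceding sign immediately (simpler state, same O(n) cost).


-- int(x): in both programs int() is only ever applied to a nonempty run of digits,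
-- where Python never raises and PySem.Int.ofChars? is `some`; getD 0 is unreachable.
def pvToInt (cs : List Char) : Int := (PySem.Int.ofChars? cs).getD 0

def pvDigits : List Char := ['0','1','2','3','4','5','6','7','8','9']

-- ===== PORT A =====
-- the for-loop of A with its full state (x, number, pr_sign, double_sign); early
-- `return False, None` becomes returning (false, none) from the recursion
def funcLoop (cs : List Char) (x : List Char) (number : Int)
    (pr_sign : Option Char) (double_sign : Bool) : Bool × Option Int :=
  match cs with
  | [] =>
      if double_sign then (false, none)
      else
        let number := if pr_sign = none then pvToInt x else number
        let number := if pr_sign = some '+' then number + pvToInt x else number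
        let number := if pr_sign = some '-' then number - pvToInt x else number
        (true, some number)
  | item :: rest =>
      if item = '+' ∨ item = '-' then
        if double_sign then (false, none)
        else
          match pr_sign with
          | some p =>   -- `if pr_sign:` — truthy iff not None
              if p = '+' then funcLoop rest [] (number + pvToInt x) (some item) true
              else if p = '-' then funcLoop rest [] (number - pvToInt x) (some item) true
              else funcLoop rest x number pr_sign double_sign  -- falls through, state unchanged
          | none =>
              if item = '+' then funcLoop rest [] (pvToInt x) (some '+') true
              else funcLoop rest [] (pvToInt x) (some '-') true
      else if item = '0' ∨ item = '1' ∨ item = '2' ∨ item = '3' ∨ item = '4' ∨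
              item = '5' ∨ item = '6' ∨ item = '7' ∨ item = '8' ∨ item = '9' then
        funcLoop rest (x ++ [item]) number pr_sign false
      else (false, none)

def func (string : String) : Bool × Option Int :=
  funcLoop string.toList [] 0 none true

-- ===== PORT B =====
-- Source B's loop over reversed(string) with state (digits, total)
def funcAltLoop (rs : List Char) (digits : List Char) (total : Int) : Bool × Option Int :=
  match rs with
  | [] =>
      if digits = [] then (false, none) else (true, some (total + pvToInt digits))
  | ch :: rest =>
      if ch ∈ pvDigits then funcAltLoop rest (ch :: digits) total
      else if ch = '+' ∨ ch = '-' then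
        if digits = [] then (false, none)
        else funcAltLoop rest []
          (total + (if ch = '+' then pvToInt digits else -pvToInt digits))
      else (false, none)

def func_alt (string : String) : Bool × Option Int :=
  funcAltLoop string.toList.reverse [] 0

-- ===== PRECONDITION & SPEC =====
def Spec_func (string : String) (out : Bool × Option Int) : Prop := out = func_alt string
instance (string : String) (out : Bool × Option Int) : Decidable (Spec_func string out) := by unfold Spec_func; infer_instance

-- ===== CLAIM (what is proved, stated in full; the proofs are below) =====
def Claim_equal_func : Prop := ∀ (string : String), Dom_func string → Spec_func string (func string)

-- ===== LEMMAS AND PROOFS =====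

-- Reference parser: for the remaining characters cs, `some (d, t)` means cs is a valid
-- tail (digits, then sign-prefixed digit groups), d is its leading digit run and t the
-- signed sum of the following groups; `none` means invalid however the scan got here.
def tailP : List Char → Option (List Char × Int)
  | [] => some ([], 0)
  | c :: cs =>
      if c ∈ pvDigits then (tailP cs).map (fun p => (c :: p.1, p.2))
      else if c = '+' ∨ c = '-' then
        match tailP cs with
        | some (d, t) =>
            if d = [] then none
            else some ([], (if c = '+' then pvToInt d else -pvToInt d) + t)
        | none => none
      else none

theorem tailP_all_digits (d : List Char) (h : ∀ c ∈ d, c ∈ pvDigits) :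
    tailP d = some (d, 0) := by
  induction d with
  | nil => rfl
  | cons c cs ih =>
      simp only [tailP, h c (by simp), if_pos, ih (fun x hx => h x (by simp [hx])),
        Option.map_some]

theorem tailP_trailing_sign (u : List Char) (c : Char) (hc : c = '+' ∨ c = '-') :
    tailP (u ++ [c]) = none := by
  induction u with
  | nil =>
      have hnd : c ∉ pvDigits := by rcases hc with h | h <;> simp [h, pvDigits]
      simp [tailP, hnd, hc]
  | cons a u ih =>
      by_cases ha : a ∈ pvDigits
      · simp [tailP, ha, ih]
      · by_cases hs : a = '+' ∨ a = '-'
        · simp [tailP, ha, hs, ih]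
        · simp [tailP, ha, hs]

theorem tailP_bad_char (u : List Char) (c : Char) (w : List Char)
    (hnd : c ∉ pvDigits) (hns : ¬(c = '+' ∨ c = '-')) :
    tailP (u ++ c :: w) = none := by
  induction u with
  | nil => simp [tailP, hnd, hns]
  | cons a u ih =>
      by_cases ha : a ∈ pvDigits
      · simp [tailP, ha, ih]
      · by_cases hs : a = '+' ∨ a = '-'
        · simp [tailP, ha, hs, ih]
        · simp [tailP, ha, hs]

theorem tailP_append_group (u : List Char) (c : Char) (d : List Char)
    (hc : c = '+' ∨ c = '-') (hd : d ≠ []) (hdig : ∀ x ∈ d, x ∈ pvDigits) :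
    tailP (u ++ c :: d) =
      (tailP u).map
        (fun p => (p.1, p.2 + (if c = '+' then pvToInt d else -pvToInt d))) := by
  induction u with
  | nil =>
      have hnd : c ∉ pvDigits := by rcases hc with h | h <;> simp [h, pvDigits]
      simp [tailP, hnd, hc, tailP_all_digits d hdig, hd]
  | cons a u ih =>
      by_cases ha : a ∈ pvDigits
      · simp only [List.cons_append, tailP, ha, if_pos, ih, Option.map_map]
        cases tailP u <;> rfl
      · by_cases hs : a = '+' ∨ a = '-'
        · simp only [List.cons_append, tailP, ha, hs, if_pos, ih]
          cases htu : tailP u with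
          | none => rfl
          | some p =>
              obtain ⟨d', t'⟩ := p
              by_cases hd' : d' = [] <;> simp [hd'] <;> ring
        · simp [tailP, ha, hs]

-- characterisation of B's loop: state (digits, total) after having read rs.reverse
theorem funcAltLoop_eq (rs : List Char) (d : List Char) (t : Int)
    (hdig : ∀ c ∈ d, c ∈ pvDigits) :
    funcAltLoop rs d t =
      (match tailP (rs.reverse ++ d) with
       | none => (false, none)
       | some (d', t') =>
           if d' = [] then (false, none) else (true, some (pvToInt d' + t' + t))) := by
  induction rs generalizing d t with
  | nil =>
      simp only [List.reverse_nil, List.nil_append, tailP_all_digits d hdig]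
      by_cases h : d = [] <;> simp [funcAltLoop, h] <;> ring
  | cons ch rest ih =>
      by_cases hdch : ch ∈ pvDigits
      · have hdig' : ∀ c ∈ ch :: d, c ∈ pvDigits := by
          intro c hc
          rcases List.mem_cons.mp hc with h | h
          · rw [h]; exact hdch
          · exact hdig c h
        have heq : (ch :: rest).reverse ++ d = rest.reverse ++ ch :: d := by simp
        rw [heq]
        simp only [funcAltLoop, hdch, if_pos]
        exact ih (ch :: d) t hdig'
      · by_cases hs : ch = '+' ∨ ch = '-'
        · by_cases hd : d = []
          · simp only [funcAltLoop, hdch, hs, if_pos, hd, List.reverse_cons, List.append_nil]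
            rw [tailP_trailing_sign rest.reverse ch hs]
            simp
          · have hgrp := tailP_append_group rest.reverse ch d hs hd hdig
            simp only [funcAltLoop, hdch, hs, if_pos, hd,
              List.reverse_cons, List.append_assoc, List.singleton_append, hgrp]
            rw [ih [] _ (by simp)]
            simp only [List.append_nil]
            cases htu : tailP rest.reverse with
            | none => rfl
            | some p =>
                obtain ⟨d', t'⟩ := p
                by_cases hd' : d' = [] <;> simp [hd'] <;> ring
        · simp only [funcAltLoop, hdch, hs, List.reverse_cons,
            List.append_assoc, List.singleton_append]
          rw [tailP_bad_char rest.reverse ch d hdch hs]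
          simp

def pvApplyPr (pr : Option Char) (n v : Int) : Int :=
  match pr with
  | none => v
  | some c => if c = '+' then n + v else n - v

-- characterisation of A's loop under its reachable-state invariants
theorem funcLoop_eq (cs : List Char) (x : List Char) (n : Int) (pr : Option Char)
    (hdig : ∀ c ∈ x, c ∈ pvDigits)
    (hpr : pr = none ∨ pr = some '+' ∨ pr = some '-') :
    funcLoop cs x n pr (decide (x = [])) =
      (match tailP cs with
       | none => (false, none)
       | some (d, t) =>
           if x = [] ∧ d = [] then (false, none)
           else (true, some (pvApplyPr pr n (pvToInt (x ++ d)) + t))) := by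
  induction cs generalizing x n pr with
  | nil =>
      by_cases hx : x = []
      · simp [funcLoop, tailP, hx]
      · rcases hpr with h | h | h <;>
          simp [funcLoop, tailP, hx, h, pvApplyPr]
  | cons item rest ih =>
      by_cases hsi : item = '+' ∨ item = '-'
      · have hndi : item ∉ pvDigits := by rcases hsi with h | h <;> simp [h, pvDigits]
        by_cases hx : x = []
        · simp only [funcLoop, hsi, if_pos, hx, decide_true, tailP, hndi]
          cases htr : tailP rest with
          | none => rfl
          | some p =>
              obtain ⟨d, t⟩ := p
              by_cases hd : d = [] <;> simp [hd]
        · have hrec : ∀ m : Int, ∀ s : Char, (s = '+' ∨ s = '-') →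
              funcLoop rest [] m (some s) true =
                (match tailP rest with
                 | none => (false, none)
                 | some (d, t) =>
                     if d = [] then (false, none)
                     else (true, some (pvApplyPr (some s) m (pvToInt d) + t))) := by
            intro m s hss
            have := ih [] m (some s) (by simp) (by rcases hss with h | h <;> simp [h])
            simpa using this
          have hstep : tailP (item :: rest) =
              (match tailP rest with
               | none => none
               | some (d, t) =>
                   if d = [] then none
                   else some ([], (if item = '+' then pvToInt d else -pvToInt d) + t)) := by
            simp only [tailP, hndi, hsi, if_pos]
            cases tailP rest with
            | none => rfl
            | some p => obtain ⟨d, t⟩ := p; rfl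
          rcases hpr with h | h | h
          all_goals (
            subst h
            simp only [funcLoop, hsi, if_pos, hx, decide_false, Bool.false_eq_true, hstep]
            rcases hsi with hi | hi <;>
              (subst hi
               simp only [if_pos, Char.reduceEq, ite_false]
               rw [hrec _ _ (by simp)]
               cases htr : tailP rest with
               | none => rfl
               | some p =>
                   obtain ⟨d, t⟩ := p
                   by_cases hd : d = [] <;>
                     simp [hd, pvApplyPr] <;> ring))
      · by_cases hdi : item ∈ pvDigits
        · have hd19 : item = '0' ∨ item = '1' ∨ item = '2' ∨ item = '3' ∨ item = '4' ∨
              item = '5' ∨ item = '6' ∨ item = '7' ∨ item = '8' ∨ item = '9' := by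
            simpa [pvDigits] using hdi
          have hx' : ∀ c ∈ x ++ [item], c ∈ pvDigits := by
            intro c hc
            rcases List.mem_append.mp hc with h | h
            · exact hdig c h
            · simp at h; simpa [h] using hdi
          have ihx := ih (x ++ [item]) n pr hx' hpr
          rw [decide_eq_false (by simp : ¬(x ++ [item] = []))] at ihx
          simp only [funcLoop, hsi, hd19, if_pos, ihx, tailP, hdi]
          cases htr : tailP rest with
          | none => rfl
          | some p =>
              obtain ⟨d, t⟩ := p
              simp [List.append_assoc]
        · simp only [funcLoop, hsi, tailP, hdi]
          have : ¬(item = '0' ∨ item = '1' ∨ item = '2' ∨ item = '3' ∨ item = '4' ∨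
              item = '5' ∨ item = '6' ∨ item = '7' ∨ item = '8' ∨ item = '9') := by
            intro h; apply hdi; simpa [pvDigits] using h
          simp [this]

-- ===== VERDICT (by name: the statement is the Claim_ definition above) =====
theorem func_spec : Claim_equal_func := by
  intro s _
  unfold Spec_func func func_alt
  have hA := funcLoop_eq s.toList [] 0 none (by simp) (by simp)
  have hB := funcAltLoop_eq s.toList.reverse [] 0 (by simp)
  simp only [List.reverse_reverse, List.append_nil] at hB
  simp only [decide_true] at hA  -- `decide ([] = [])` is `true`
  rw [hA, hB]
  cases htr : tailP s.toList with
  | none => rfl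
  | some p =>
      obtain ⟨d, t⟩ := p
      by_cases hd : d = [] <;> simp [hd, pvApplyPr]
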